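-- pv_equiv track=rewrite | github.com/Qchan233/QM-Method | qm.py | compare_tuple
-- ===== SOURCE A (Python) =====
-- def compare_tuple(tup1, tup2):
--     assert len(tup1) == len(tup2)
--
--     res = []
--     diff_count = 0
--     for t1, t2 in zip(tup1, tup2):
--         if t1 != t2:
--             diff_count += 1
--             res.append('-')
--         else:
--             res.append(t1)
--
--         if diff_count > 1:
--             return None
--
--     assert diff_count == 1
--     return res
-- ===== SOURCE B (Python) =====
-- def compare_tuple(tup1, tup2):
--     assert len(tup1) == len(tup2)
--     diffs = [i for i, (a, b) in enumerate(zip(tup1, tup2)) if a != b]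
--     if len(diffs) > 1:
--         return None
--     assert len(diffs) == 1
--     res = list(tup1)
--     res[diffs[0]] = '-'
--     return res
-- ===== Notes on version B (the rewrite author's own statement) =====
-- stated objective: simpler
-- what changed: B first collects the differing indices with one enumerate/zip comprehension and then builds the output by copying tup1 and overwriting the single differing slot, instead of A's interleaved loop that maintains a diff counter while appending to the result element by element.
import Mathlib
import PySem

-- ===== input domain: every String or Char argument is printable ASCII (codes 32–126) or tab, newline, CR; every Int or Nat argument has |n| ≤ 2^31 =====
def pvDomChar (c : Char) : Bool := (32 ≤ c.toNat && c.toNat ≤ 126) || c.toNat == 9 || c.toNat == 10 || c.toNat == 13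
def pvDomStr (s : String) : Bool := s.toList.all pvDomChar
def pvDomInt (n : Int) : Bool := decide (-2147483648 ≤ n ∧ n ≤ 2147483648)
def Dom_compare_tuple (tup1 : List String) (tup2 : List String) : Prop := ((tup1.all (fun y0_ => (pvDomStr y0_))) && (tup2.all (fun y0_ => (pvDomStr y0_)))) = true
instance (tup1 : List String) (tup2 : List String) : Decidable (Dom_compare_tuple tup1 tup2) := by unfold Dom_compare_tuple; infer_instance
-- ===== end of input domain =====

-- B separates finding the differing indices (one enumerate/zip pass) from building the output
-- (copy tup1, overwrite one slot), replacing A's interleaved counting loop: simpler decomposition.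


-- ===== PORT A =====
-- The loop over zip(tup1, tup2), carrying diff_count; builds res in order (the early
-- 'return None' is the none in the a ≠ b branch, the final 'assert diff_count == 1' is
-- the check at the end of the list; an assertion failure is rendered as none, outside Pre_).
def compareLoopA : List (String × String) → Int → Option (List String)
  | [], diff_count => if diff_count = 1 then some [] else none
  | (t1, t2) :: rest, diff_count =>
    if t1 ≠ t2 then
      if diff_count + 1 > 1 then none
      else (compareLoopA rest (diff_count + 1)).map (fun r => "-" :: r)
    else (compareLoopA rest diff_count).map (fun r => t1 :: r)

def compare_tuple (tup1 : List String) (tup2 : List String) : Option (List String) :=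
  compareLoopA (tup1.zip tup2) 0

-- ===== PORT B =====
-- diffs = [i for i, (a, b) in enumerate(zip(tup1, tup2)) if a != b]
-- the comprehension's filter/map step: keep the index when the pair differs
def pvKeep (p : Int × (String × String)) : Option Int :=
  if p.2.1 ≠ p.2.2 then some p.1 else none

def pvDiffs (tup1 : List String) (tup2 : List String) : List Int :=
  (PySem.List.enumerate (tup1.zip tup2) 0).filterMap pvKeep

def compare_tuple_alt (tup1 : List String) (tup2 : List String) : Option (List String) :=
  let diffs := pvDiffs tup1 tup2
  if diffs.length > 1 then none
  else
    match diffs with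
    | [i] => some (PySem.List.pySetD tup1 i "-")   -- res = list(tup1); res[diffs[0]] = '-'
    | _ => none                                    -- assert len(diffs) == 1 fails, outside Pre_

-- ===== PRECONDITION & SPEC =====
-- Pre_ excludes exactly the inputs where A raises AssertionError: unequal lengths, and
-- equal tuples (zero differing positions, so the final 'assert diff_count == 1' fails).
def Pre_compare_tuple (tup1 : List String) (tup2 : List String) : Prop :=
  tup1.length = tup2.length ∧ tup1 ≠ tup2
instance (tup1 : List String) (tup2 : List String) : Decidable (Pre_compare_tuple tup1 tup2) := by
  unfold Pre_compare_tuple; infer_instance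

def pvWitness_compare_tuple : List String × List String := (["a", "b", "c"], ["a", "x", "c"])

def Spec_compare_tuple (tup1 : List String) (tup2 : List String) (out : Option (List String)) : Prop := out = compare_tuple_alt tup1 tup2
instance (tup1 : List String) (tup2 : List String) (out : Option (List String)) : Decidable (Spec_compare_tuple tup1 tup2 out) := by unfold Spec_compare_tuple; infer_instance

-- ===== CLAIM (what is proved, stated in full; the proofs are below) =====
def Claim_equal_compare_tuple : Prop := ∀ (tup1 : List String) (tup2 : List String), Dom_compare_tuple tup1 tup2 → Pre_compare_tuple tup1 tup2 → Spec_compare_tuple tup1 tup2 (compare_tuple tup1 tup2)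

-- ===== LEMMAS AND PROOFS =====

-- index list of the differing positions of a pair list, as B computes it
def diffIdx (ps : List (String × String)) : List Int :=
  (PySem.List.enumerate ps 0).filterMap pvKeep

theorem pvDiffs_eq (tup1 tup2 : List String) :
    pvDiffs tup1 tup2 = diffIdx (tup1.zip tup2) := rfl

theorem diffIdx_shift (ps : List (String × String)) (s : Int) :
    (PySem.List.enumerate ps s).filterMap pvKeep = (diffIdx ps).map (· + s) := by
  induction ps generalizing s with
  | nil => simp [diffIdx]
  | cons p rest ih =>
    rcases p with ⟨a, b⟩
    rw [show diffIdx ((a, b) :: rest)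
          = (PySem.List.enumerate ((a, b) :: rest) 0).filterMap pvKeep from rfl]
    rw [PySem.List.enumerate_cons, PySem.List.enumerate_cons,
        List.filterMap_cons, List.filterMap_cons, ih (s + 1), ih (0 + 1)]
    by_cases h : a = b
    · rw [show pvKeep (s, (a, b)) = none from by simp [pvKeep, h],
          show pvKeep (0, (a, b)) = none from by simp [pvKeep, h], List.map_map]
      exact List.map_congr_left (fun x _ => by simp; ring)
    · rw [show pvKeep (s, (a, b)) = some s from by simp [pvKeep, h],
          show pvKeep (0, (a, b)) = some 0 from by simp [pvKeep, h], List.map_cons, List.map_map]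
      simp only [List.cons.injEq]
      exact ⟨by ring, List.map_congr_left (fun x _ => by simp; ring)⟩

theorem diffIdx_cons (a b : String) (rest : List (String × String)) :
    diffIdx ((a, b) :: rest)
      = if a ≠ b then 0 :: (diffIdx rest).map (· + 1) else (diffIdx rest).map (· + 1) := by
  rw [show diffIdx ((a, b) :: rest)
        = (PySem.List.enumerate ((a, b) :: rest) 0).filterMap pvKeep from rfl]
  rw [PySem.List.enumerate_cons, List.filterMap_cons, diffIdx_shift rest (0 + 1)]
  by_cases h : a = b <;> simp [pvKeep, h]

theorem diffIdx_nonneg (ps : List (String × String)) : ∀ i ∈ diffIdx ps, 0 ≤ i := by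
  intro i hi
  unfold diffIdx at hi
  rcases List.mem_filterMap.mp hi with ⟨p, hp, hval⟩
  rcases (PySem.List.mem_enumerate_iff _ _ _).mp hp with ⟨k, hk, rfl⟩
  simp only [pvKeep] at hval
  split_ifs at hval <;> simp only [Option.some.injEq] at hval
  omega

-- with diff_count already 1, the loop succeeds iff no further difference occurs
theorem compareLoopA_one (ps : List (String × String)) :
    compareLoopA ps 1
      = if diffIdx ps = [] then some (ps.map Prod.fst) else none := by
  induction ps with
  | nil => simp [compareLoopA, diffIdx]
  | cons p rest ih =>
    rcases p with ⟨a, b⟩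
    rw [diffIdx_cons]
    by_cases h : a = b
    · simp only [compareLoopA, h, ne_eq, not_true_eq_false, if_false, ih]
      by_cases hd : diffIdx rest = [] <;> simp [hd]
    · simp [compareLoopA, h]

-- the key characterisation of A's loop by B's index list
theorem compareLoopA_zero (ps : List (String × String)) :
    compareLoopA ps 0
      = match diffIdx ps with
        | [i] => some ((ps.map Prod.fst).set i.toNat "-")
        | _ => none := by
  induction ps with
  | nil => simp [compareLoopA, diffIdx]
  | cons p rest ih =>
    rcases p with ⟨a, b⟩
    rw [diffIdx_cons]
    by_cases h : a = b
    · simp only [compareLoopA, h, ne_eq, not_true_eq_false, if_false, ih]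
      rcases hd : diffIdx rest with _ | ⟨i, _ | _⟩ <;> simp_all
      have h0 : (0 : Int) ≤ i := diffIdx_nonneg rest i (by rw [hd]; simp)
      have ht : (i + 1).toNat = i.toNat + 1 := by omega
      simp [ht]
    · simp only [compareLoopA, h, ne_eq, not_false_eq_true, if_true]
      rw [if_neg (by omega : ¬ ((0 : Int) + 1 > 1)), show (0 : Int) + 1 = 1 from rfl,
          compareLoopA_one]
      rcases hd : diffIdx rest with _ | ⟨i, _⟩ <;> simp_all

theorem ne_lists_have_diff (tup1 tup2 : List String)
    (hlen : tup1.length = tup2.length) (hne : tup1 ≠ tup2) :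
    diffIdx (tup1.zip tup2) ≠ [] := by
  intro hnil
  apply hne
  apply List.ext_getElem hlen
  intro k h1 h2
  by_contra hk
  have hmem : ((k : Int)) ∈ diffIdx (tup1.zip tup2) := by
    refine List.mem_filterMap.mpr ⟨((k : Int), (tup1[k], tup2[k])), ?_, by simp [pvKeep, hk]⟩
    refine (PySem.List.mem_enumerate_iff _ _ _).mpr ⟨k, by simp [List.length_zip]; omega, ?_⟩
    simp [List.getElem_zip]
  rw [hnil] at hmem; simp at hmem

-- ===== VERDICT (by name: the statement is the Claim_ definition above) =====
theorem compare_tuple_spec : Claim_equal_compare_tuple := by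
  intro tup1 tup2 _ ⟨hlen, hne⟩
  show compare_tuple tup1 tup2 = compare_tuple_alt tup1 tup2
  unfold compare_tuple compare_tuple_alt
  rw [compareLoopA_zero, pvDiffs_eq]
  have hfst : (tup1.zip tup2).map Prod.fst = tup1 := List.map_fst_zip (le_of_eq hlen)
  rcases hd : diffIdx (tup1.zip tup2) with _ | ⟨i, _ | _⟩
  · exact absurd hd (ne_lists_have_diff tup1 tup2 hlen hne)
  · have h0 : (0 : Int) ≤ i := diffIdx_nonneg _ i (by rw [hd]; simp)
    simp [hfst, PySem.List.pySetD_of_nonneg _ _ h0]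
  · simp
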